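-- pv_equiv track=rewrite | github.com/San-Leandro-High-Makers-Club/cosmos-unknown | challenges.py | space_acquaintance
-- ===== SOURCE A (Python) =====
-- from typing import List, Dict, Tuple, Set, Union
--
-- def space_acquaintance(space_from: list, space_to: list) -> int:
--     """
--     >>> space_acquaintance([1, 2, 2, 3, 4, 5], [2, 4, 5, 5, 5, 6])
--     3
--     >>> space_acquaintance([1, 4, 4, 2, 5, 6, 7, 2], [3, 1, 3, 5, 6, 7, 5, 6])
--     0
--     """
--     if len(space_from) != len(space_to):
--         return -1  # this behaviour is not defined
--
--     acquaintance_index: Dict[int, List[int]] = {}  # maps each astronaut to a list of other astronauts whom they know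
--     for i in range(len(space_from)):
--         if space_from[i] == space_to[i]:
--             continue
--         if space_from[i] not in acquaintance_index:  # if we haven't yet started building an index for this astronaut...
--             acquaintance_index[space_from[i]] = []  # ...start building an index
--         if space_to[i] not in acquaintance_index:
--             acquaintance_index[space_to[i]] = []
--         # add each astronaut to the other's index, if they're not already there
--         if space_to[i] not in acquaintance_index[space_from[i]]:
--             acquaintance_index[space_from[i]].append(space_to[i])
--         if space_from[i] not in acquaintance_index[space_to[i]]:
--             acquaintance_index[space_to[i]].append(space_from[i])
--     # sort acquaintance indices
--     for astronaut in list(acquaintance_index):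
--         acquaintance_index[astronaut].sort()
--
--     astronauts = list(acquaintance_index)
--     astronauts.sort()
--     trios: List[tuple] = []
--     for astronaut in astronauts:
--         # find all trios containing this astronaut
--         # for a trio, this first astronaut must know a second astronaut, who knows a third astronaut, who in turn knows
--         # this first astronaut
--         for second_astronaut in acquaintance_index[astronaut]:
--             for third_astronaut in acquaintance_index[second_astronaut]:
--                 if astronaut in acquaintance_index[third_astronaut]:  # this is a trio
--                     # we list trios as 3-tuples, with the astronauts in ascending order
--                     # if these astronauts are not in ascending order, we need not record this trio, as it will duplicate
--                     # the previous record of this same trio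
--                     if astronaut < second_astronaut < third_astronaut:
--                         trios.append((astronaut, second_astronaut, third_astronaut))
--
--     if len(trios) == 0:
--         return -1
--
--     acquaintance_sums: List[int] = []
--     for trio in trios:
--         # list the astronauts known by this trio
--         acquaintances: List[int] = []
--         for astronaut in acquaintance_index[trio[0]]:
--             if astronaut not in acquaintances and astronaut not in trio:
--                 acquaintances.append(astronaut)
--         for astronaut in acquaintance_index[trio[1]]:
--             if astronaut not in acquaintances and astronaut not in trio:
--                 acquaintances.append(astronaut)
--         for astronaut in acquaintance_index[trio[2]]:
--             if astronaut not in acquaintances and astronaut not in trio: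
--                 acquaintances.append(astronaut)
--         acquaintance_sums.append(len(acquaintances))
--
--     return min(acquaintance_sums)
-- ===== SOURCE B (Python) =====
-- def space_acquaintance(space_from: list, space_to: list) -> int:
--     if len(space_from) != len(space_to):
--         return -1
--     adj = {}
--     for u, v in zip(space_from, space_to):
--         if u != v:
--             adj.setdefault(u, set()).add(v)
--             adj.setdefault(v, set()).add(u)
--     # orient every edge from the lower to the higher id: each triangle u<v<w is
--     # produced exactly once, and its outside-acquaintance count comes from
--     # inclusion-exclusion on degrees (the trio members themselves account for the -3)
--     fwd = {u: {v for v in adj[u] if u < v} for u in adj}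
--     counts = [len(adj[u]) + len(adj[v]) + len(adj[w])
--               - len(adj[u] & adj[v]) - len(adj[u] & adj[w]) - len(adj[v] & adj[w])
--               + len(adj[u] & adj[v] & adj[w]) - 3
--               for u in fwd
--               for v in fwd[u]
--               for w in fwd[u] & fwd[v]]
--     return min(counts, default=-1)
-- ===== Notes on version B (the rewrite author's own statement) =====
-- stated objective: alternative
-- what changed: A builds symmetric sorted adjacency lists with dedup scans, walks neighbor-of-neighbor chains (a, b in N(a), c in N(b), test a in N(c)) to collect trios, and materializes each trio's outside-acquaintance list by three dedup append passes before taking min of a sums list; B orients every edge toward the higher id so each triangle is generated once from the oriented out-neighborhoods, and computes the outside count purely arithmetically by inclusion-exclusion on degrees and pairwise/triple intersection sizes (no union or difference set is ever built), streaming through min(..., default=-1).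
import Mathlib
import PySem

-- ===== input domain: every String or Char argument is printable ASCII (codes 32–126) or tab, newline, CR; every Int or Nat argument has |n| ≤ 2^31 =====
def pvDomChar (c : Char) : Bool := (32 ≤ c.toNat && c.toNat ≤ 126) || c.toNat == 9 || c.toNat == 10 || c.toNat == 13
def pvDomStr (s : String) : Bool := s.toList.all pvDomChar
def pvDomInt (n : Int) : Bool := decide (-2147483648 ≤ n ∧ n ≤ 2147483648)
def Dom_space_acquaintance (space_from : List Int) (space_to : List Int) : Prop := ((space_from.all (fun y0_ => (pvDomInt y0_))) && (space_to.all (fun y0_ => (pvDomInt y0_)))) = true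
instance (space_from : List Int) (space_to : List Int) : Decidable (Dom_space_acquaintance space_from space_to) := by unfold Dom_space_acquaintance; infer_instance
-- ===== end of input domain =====

-- B replaces A's sorted-adjacency-list neighbour-chain walk and dedup union lists by
-- edge orientation toward the higher id (each triangle generated once from oriented
-- out-neighbourhoods) and an inclusion-exclusion degree count (objective: alternative).

-- ===== PORT A =====
-- one iteration of A's index-building loop (body of 'for i in range(len(space_from))')
def paStep (d : PySem.Dict Int (List Int)) (u v : Int) : PySem.Dict Int (List Int) :=
  if u = v then d
  else
    let d1 := if d.contains u then d else d.insert u []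
    let d2 := if d1.contains v then d1 else d1.insert v []
    let d3 := if (d2.getD u []).contains v then d2 else d2.modify u [] (fun l => l ++ [v])
    if (d3.getD v []).contains u then d3 else d3.modify v [] (fun l => l ++ [u])

def paIndex (space_from : List Int) (space_to : List Int) : PySem.Dict Int (List Int) :=
  (PySem.List.pyRange 0 space_from.length 1).foldl
    (fun d i => paStep d (PySem.List.pyGetD space_from i 0) (PySem.List.pyGetD space_to i 0))
    PySem.Dict.empty

-- 'for astronaut in list(acquaintance_index): acquaintance_index[astronaut].sort()'
def paSorted (d : PySem.Dict Int (List Int)) : PySem.Dict Int (List Int) :=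
  d.keys.foldl (fun d k => d.modify k [] (fun l => PySem.List.sorted l (fun x => x) false)) d

-- the triple nested trio-collecting loop
def paTrios (d : PySem.Dict Int (List Int)) : List (Int × Int × Int) :=
  (PySem.List.sorted d.keys (fun x => x) false).foldl (fun acc a =>
    (d.getD a []).foldl (fun acc b =>
      (d.getD b []).foldl (fun acc c =>
        if (d.getD c []).contains a then
          if a < b ∧ b < c then acc ++ [(a, b, c)] else acc
        else acc) acc) acc) []

-- body of the dedup loops building 'acquaintances'
def paAdd (t : Int × Int × Int) (acc : List Int) (x : Int) : List Int :=
  if x ∉ acc ∧ ¬(x = t.1 ∨ x = t.2.1 ∨ x = t.2.2) then acc ++ [x] else acc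

def paCount (d : PySem.Dict Int (List Int)) (t : Int × Int × Int) : Int :=
  let a1 := (d.getD t.1 []).foldl (paAdd t) []
  let a2 := (d.getD t.2.1 []).foldl (paAdd t) a1
  let a3 := (d.getD t.2.2 []).foldl (paAdd t) a2
  (a3.length : Int)

def space_acquaintance (space_from : List Int) (space_to : List Int) : Int :=
  if space_from.length ≠ space_to.length then -1
  else
    let d := paSorted (paIndex space_from space_to)
    let trios := paTrios d
    if trios.length = 0 then -1
    else
      let sums := trios.foldl (fun acc t => acc ++ [paCount d t]) []
      (PySem.List.min? sums (fun x => x)).getD (-1)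

-- ===== PORT B =====
-- 'adj.setdefault(u, set()).add(v)' = adj[u] = adj.get(u, set()) with v added (Dict.modify)
def pbAdj (space_from : List Int) (space_to : List Int) : PySem.Dict Int (PySem.Set Int) :=
  (space_from.zip space_to).foldl (fun d p =>
    if p.1 ≠ p.2 then
      (d.modify p.1 PySem.Set.empty (fun s => PySem.Set.add s p.2)).modify p.2 PySem.Set.empty
        (fun s => PySem.Set.add s p.1)
    else d) PySem.Dict.empty

-- 'fwd = {u: {v for v in adj[u] if u < v} for u in adj}' (a set comprehension over a
-- nodup set filters it)
def pbFwd (adj : PySem.Dict Int (PySem.Set Int)) : PySem.Dict Int (PySem.Set Int) :=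
  adj.keys.foldl (fun d u =>
    d.insert u ((adj.getD u PySem.Set.empty).filter (fun v => decide (u < v))))
    PySem.Dict.empty

-- the inclusion-exclusion expression of the comprehension body
def pbCount (adj : PySem.Dict Int (PySem.Set Int)) (u v w : Int) : Int :=
  PySem.Set.len (adj.getD u PySem.Set.empty) + PySem.Set.len (adj.getD v PySem.Set.empty)
    + PySem.Set.len (adj.getD w PySem.Set.empty)
    - PySem.Set.len (PySem.Set.inter (adj.getD u PySem.Set.empty) (adj.getD v PySem.Set.empty))
    - PySem.Set.len (PySem.Set.inter (adj.getD u PySem.Set.empty) (adj.getD w PySem.Set.empty))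
    - PySem.Set.len (PySem.Set.inter (adj.getD v PySem.Set.empty) (adj.getD w PySem.Set.empty))
    + PySem.Set.len (PySem.Set.inter
        (PySem.Set.inter (adj.getD u PySem.Set.empty) (adj.getD v PySem.Set.empty))
        (adj.getD w PySem.Set.empty))
    - 3

-- the counts comprehension (results consumed only by min, which is order-insensitive)
def pbCounts (adj fwd : PySem.Dict Int (PySem.Set Int)) : List Int :=
  fwd.keys.flatMap (fun u =>
    (fwd.getD u PySem.Set.empty).flatMap (fun v =>
      (PySem.Set.inter (fwd.getD u PySem.Set.empty) (fwd.getD v PySem.Set.empty)).map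
        (fun w => pbCount adj u v w)))

def space_acquaintance_alt (space_from : List Int) (space_to : List Int) : Int :=
  if space_from.length ≠ space_to.length then -1
  else
    let adj := pbAdj space_from space_to
    PySem.List.minD (pbCounts adj (pbFwd adj)) (fun x => x) (-1)

-- ===== PRECONDITION & SPEC =====
def Spec_space_acquaintance (space_from : List Int) (space_to : List Int) (out : Int) : Prop := out = space_acquaintance_alt space_from space_to
instance (space_from : List Int) (space_to : List Int) (out : Int) : Decidable (Spec_space_acquaintance space_from space_to out) := by unfold Spec_space_acquaintance; infer_instance

-- ===== CLAIM (what is proved, stated in full; the proofs are below) =====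
def Claim_equal_space_acquaintance : Prop := ∀ (space_from : List Int) (space_to : List Int), Dom_space_acquaintance space_from space_to → Spec_space_acquaintance space_from space_to (space_acquaintance space_from space_to)

-- ===== LEMMAS AND PROOFS =====

-- the acquaintance relation induced by the (from, to) pairs
def pvE (l : List (Int × Int)) (x y : Int) : Prop :=
  x ≠ y ∧ ((x, y) ∈ l ∨ (y, x) ∈ l)

-- invariant of A's index dict
def pvGoodA (d : PySem.Dict Int (List Int)) (R : Int → Int → Prop) : Prop :=
  (∀ x y, y ∈ d.getD x [] ↔ R x y) ∧
  (∀ x, x ∈ d.keys ↔ ∃ y, R x y) ∧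
  (∀ x, (d.getD x []).Nodup) ∧ d.keys.Nodup

-- invariant of B's adjacency dict
def pvGoodB (d : PySem.Dict Int (PySem.Set Int)) (R : Int → Int → Prop) : Prop :=
  (∀ x y, y ∈ d.getD x PySem.Set.empty ↔ R x y) ∧
  (∀ x, x ∈ d.keys ↔ ∃ y, R x y) ∧
  (∀ x, (d.getD x PySem.Set.empty).Nodup) ∧ d.keys.Nodup

theorem pvGoodA_congr {d : PySem.Dict Int (List Int)} {R R' : Int → Int → Prop}
    (h : pvGoodA d R) (he : ∀ x y, R x y ↔ R' x y) : pvGoodA d R' := by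
  obtain ⟨h1, h2, h3, h4⟩ := h
  exact ⟨fun x y => (h1 x y).trans (he x y),
    fun x => (h2 x).trans (exists_congr fun y => he x y), h3, h4⟩

theorem pvGoodB_congr {d : PySem.Dict Int (PySem.Set Int)} {R R' : Int → Int → Prop}
    (h : pvGoodB d R) (he : ∀ x y, R x y ↔ R' x y) : pvGoodB d R' := by
  obtain ⟨h1, h2, h3, h4⟩ := h
  exact ⟨fun x y => (h1 x y).trans (he x y),
    fun x => (h2 x).trans (exists_congr fun y => he x y), h3, h4⟩

-- facts about A's "ensure the key exists" step
theorem pvEnsure_getD (d : PySem.Dict Int (List Int)) (u x : Int) :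
    (if d.contains u then d else d.insert u []).getD x [] = d.getD x [] := by
  split
  · rfl
  · next hc =>
    rw [PySem.Dict.getD_insert]
    split
    · next hx =>
      subst hx
      rw [PySem.Dict.getD_of_not_contains _ _ (by simpa using hc)]
    · rfl

theorem pvEnsure_keys (d : PySem.Dict Int (List Int)) (u x : Int) :
    x ∈ (if d.contains u then d else d.insert u []).keys ↔ x = u ∨ x ∈ d.keys := by
  split
  · next hc =>
    constructor
    · exact Or.inr
    · rintro (rfl | h)
      · exact (PySem.Dict.contains_iff_mem_keys d x).mp hc
      · exact h
  · exact PySem.Dict.mem_keys_insert d u x []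

theorem pvEnsure_nodup_keys (d : PySem.Dict Int (List Int)) (u : Int) (h : d.keys.Nodup) :
    (if d.contains u then d else d.insert u []).keys.Nodup := by
  split
  · exact h
  · exact PySem.Dict.nodup_keys_insert d u [] h

-- facts about A's "append the neighbour if missing" step
theorem pvApp_getD (d : PySem.Dict Int (List Int)) (u v x : Int) :
    ∀ y, y ∈ (if (d.getD u []).contains v then d
        else d.modify u [] (fun l => l ++ [v])).getD x [] ↔
      y ∈ d.getD x [] ∨ (x = u ∧ y = v) := by
  intro y
  split
  · next hc =>
    have hv : v ∈ d.getD u [] := List.contains_iff_mem.mp hc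
    constructor
    · exact Or.inl
    · rintro (h | ⟨rfl, rfl⟩)
      · exact h
      · exact hv
  · rw [PySem.Dict.getD_modify]
    split
    · next hx => subst hx; simp [or_comm]
    · next hx => simp [hx]

theorem pvApp_keys (d : PySem.Dict Int (List Int)) (u v x : Int) (hu : u ∈ d.keys) :
    x ∈ (if (d.getD u []).contains v then d
        else d.modify u [] (fun l => l ++ [v])).keys ↔ x ∈ d.keys := by
  split
  · exact Iff.rfl
  · rw [PySem.Dict.keys_modify, PySem.Dict.mem_keys_insert]
    constructor
    · rintro (rfl | h)
      · exact hu
      · exact h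
    · exact Or.inr

theorem pvApp_nodup_keys (d : PySem.Dict Int (List Int)) (u v : Int) (h : d.keys.Nodup) :
    (if (d.getD u []).contains v then d else d.modify u [] (fun l => l ++ [v])).keys.Nodup := by
  split
  · exact h
  · rw [PySem.Dict.keys_modify]
    exact (PySem.Dict.nodup_keys_insert _ _ _ h)

theorem pvApp_nodup_getD (d : PySem.Dict Int (List Int)) (u v : Int)
    (h : ∀ x, (d.getD x []).Nodup) :
    ∀ x, ((if (d.getD u []).contains v then d
        else d.modify u [] (fun l => l ++ [v])).getD x []).Nodup := by
  intro x
  split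
  · exact h x
  · next hc =>
    rw [PySem.Dict.getD_modify]
    split
    · next hx =>
      have hv : v ∉ d.getD u [] := fun hm => hc (List.contains_iff_mem.mpr hm)
      exact (h u).append (List.nodup_singleton v)
        (by intro b hb hb'; simp only [List.mem_singleton] at hb'; subst hb'; exact hv hb)
    · exact h x

-- one step preserves the A-invariant, extending the relation by the new pair
theorem pvStepA {d : PySem.Dict Int (List Int)} {R : Int → Int → Prop}
    (h : pvGoodA d R) (u v : Int) :
    pvGoodA (paStep d u v) (fun x y => R x y ∨ (x ≠ y ∧ ((x, y) = (u, v) ∨ (y, x) = (u, v)))) := by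
  obtain ⟨h1, h2, h3, h4⟩ := h
  by_cases huv : u = v
  · subst huv
    rw [paStep, if_pos rfl]
    refine pvGoodA_congr ⟨h1, h2, h3, h4⟩ ?_
    intro x y
    constructor
    · exact Or.inl
    · rintro (h | ⟨hne, h | h⟩)
      · exact h
      · exact absurd (by cases h; rfl) hne
      · exact absurd (by cases h; rfl) hne
  · rw [paStep, if_neg huv]
    set d1 := if d.contains u then d else d.insert u [] with hd1
    set d2 := if d1.contains v then d1 else d1.insert v [] with hd2
    set d3 := if (d2.getD u []).contains v then d2 else d2.modify u [] (fun l => l ++ [v]) with hd3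
    -- getD facts
    have g1 : ∀ x, d1.getD x [] = d.getD x [] := fun x => pvEnsure_getD d u x
    have g2 : ∀ x, d2.getD x [] = d.getD x [] := fun x => (pvEnsure_getD d1 v x).trans (g1 x)
    have g3 : ∀ x y, y ∈ d3.getD x [] ↔ y ∈ d.getD x [] ∨ (x = u ∧ y = v) := by
      intro x y
      rw [hd3]
      have := pvApp_getD d2 u v x y
      rw [this, g2]
    have g4 : ∀ x y, y ∈ (if (d3.getD v []).contains u then d3
        else d3.modify v [] (fun l => l ++ [u])).getD x [] ↔
        (y ∈ d.getD x [] ∨ (x = u ∧ y = v)) ∨ (x = v ∧ y = u) := by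
      intro x y
      rw [pvApp_getD d3 v u x y, g3]
    -- keys facts
    have k1 : ∀ x, x ∈ d1.keys ↔ x = u ∨ x ∈ d.keys := fun x => pvEnsure_keys d u x
    have k2 : ∀ x, x ∈ d2.keys ↔ x = v ∨ x = u ∨ x ∈ d.keys := by
      intro x; rw [pvEnsure_keys d1 v x, k1]
    have hu2 : u ∈ d2.keys := (k2 u).mpr (Or.inr (Or.inl rfl))
    have k3 : ∀ x, x ∈ d3.keys ↔ x = v ∨ x = u ∨ x ∈ d.keys := by
      intro x; rw [hd3, pvApp_keys d2 u v x hu2, k2]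
    have hv3 : v ∈ d3.keys := (k3 v).mpr (Or.inl rfl)
    have k4 : ∀ x, x ∈ (if (d3.getD v []).contains u then d3
        else d3.modify v [] (fun l => l ++ [u])).keys ↔ x = v ∨ x = u ∨ x ∈ d.keys := by
      intro x; rw [pvApp_keys d3 v u x hv3, k3]
    -- nodups
    have n1 : ∀ x, (d2.getD x []).Nodup := fun x => (g2 x) ▸ h3 x
    have n3 : ∀ x, (d3.getD x []).Nodup := pvApp_nodup_getD d2 u v n1
    have n4 : ∀ x, ((if (d3.getD v []).contains u then d3
        else d3.modify v [] (fun l => l ++ [u])).getD x []).Nodup :=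
      pvApp_nodup_getD d3 v u n3
    have nk : (if (d3.getD v []).contains u then d3
        else d3.modify v [] (fun l => l ++ [u])).keys.Nodup :=
      pvApp_nodup_keys d3 v u (pvApp_nodup_keys d2 u v
        (pvEnsure_nodup_keys d1 v (pvEnsure_nodup_keys d u h4)))
    refine ⟨?_, ?_, n4, nk⟩
    · intro x y
      rw [g4, h1]
      constructor
      · rintro ((h | ⟨rfl, rfl⟩) | ⟨rfl, rfl⟩)
        · exact Or.inl h
        · exact Or.inr ⟨huv, Or.inl rfl⟩
        · exact Or.inr ⟨fun hh => huv hh.symm, Or.inr rfl⟩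
      · rintro (h | ⟨hne, h | h⟩)
        · exact Or.inl (Or.inl h)
        · obtain ⟨rfl, rfl⟩ : x = u ∧ y = v := by
            constructor <;> [exact congrArg Prod.fst h; exact congrArg Prod.snd h]
          exact Or.inl (Or.inr ⟨rfl, rfl⟩)
        · obtain ⟨rfl, rfl⟩ : y = u ∧ x = v := by
            constructor <;> [exact congrArg Prod.fst h; exact congrArg Prod.snd h]
          exact Or.inr ⟨rfl, rfl⟩
    · intro x
      rw [k4, h2]
      constructor
      · rintro (rfl | rfl | ⟨y, hy⟩)
        · exact ⟨u, Or.inr ⟨fun hh => huv hh.symm, Or.inr rfl⟩⟩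
        · exact ⟨v, Or.inr ⟨huv, Or.inl rfl⟩⟩
        · exact ⟨y, Or.inl hy⟩
      · rintro ⟨y, h | ⟨hne, h | h⟩⟩
        · exact Or.inr (Or.inr ⟨y, h⟩)
        · exact Or.inr (Or.inl (congrArg Prod.fst h))
        · exact Or.inl (congrArg Prod.snd h)

theorem pvFoldA {l : List (Int × Int)} {d : PySem.Dict Int (List Int)} {R : Int → Int → Prop}
    (h : pvGoodA d R) :
    pvGoodA (l.foldl (fun d p => paStep d p.1 p.2) d)
      (fun x y => R x y ∨ (x ≠ y ∧ ((x, y) ∈ l ∨ (y, x) ∈ l))) := by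
  induction l generalizing d R with
  | nil => simpa using pvGoodA_congr h (by simp)
  | cons p t ih =>
    simp only [List.foldl_cons]
    refine pvGoodA_congr (ih (pvStepA h p.1 p.2)) ?_
    intro x y
    constructor
    · rintro ((h | ⟨hne, h | h⟩) | ⟨hne, h | h⟩)
      · exact Or.inl h
      · exact Or.inr ⟨hne, Or.inl (h ▸ List.mem_cons_self)⟩
      · exact Or.inr ⟨hne, Or.inr (h ▸ List.mem_cons_self)⟩
      · exact Or.inr ⟨hne, Or.inl (List.mem_cons_of_mem _ h)⟩
      · exact Or.inr ⟨hne, Or.inr (List.mem_cons_of_mem _ h)⟩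
    · rintro (h | ⟨hne, h | h⟩)
      · exact Or.inl (Or.inl h)
      · rcases List.mem_cons.mp h with h | h
        · exact Or.inl (Or.inr ⟨hne, Or.inl h⟩)
        · exact Or.inr ⟨hne, Or.inl h⟩
      · rcases List.mem_cons.mp h with h | h
        · exact Or.inl (Or.inr ⟨hne, Or.inr h⟩)
        · exact Or.inr ⟨hne, Or.inr h⟩

theorem pvStepB {d : PySem.Dict Int (PySem.Set Int)} {R : Int → Int → Prop}
    (h : pvGoodB d R) (u v : Int) :
    pvGoodB ((if u ≠ v then
        (d.modify u PySem.Set.empty (fun s => PySem.Set.add s v)).modify v PySem.Set.empty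
          (fun s => PySem.Set.add s u)
      else d))
      (fun x y => R x y ∨ (x ≠ y ∧ ((x, y) = (u, v) ∨ (y, x) = (u, v)))) := by
  obtain ⟨h1, h2, h3, h4⟩ := h
  by_cases huv : u = v
  · subst huv
    rw [if_neg (by simp)]
    refine pvGoodB_congr ⟨h1, h2, h3, h4⟩ ?_
    intro x y
    constructor
    · exact Or.inl
    · rintro (h | ⟨hne, h | h⟩)
      · exact h
      · exact absurd (by cases h; rfl) hne
      · exact absurd (by cases h; rfl) hne
  · rw [if_pos huv]
    have g : ∀ x y, y ∈ ((d.modify u PySem.Set.empty (fun s => PySem.Set.add s v)).modify v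
        PySem.Set.empty (fun s => PySem.Set.add s u)).getD x PySem.Set.empty ↔
        (y ∈ d.getD x PySem.Set.empty ∨ (x = u ∧ y = v)) ∨ (x = v ∧ y = u) := by
      intro x y
      rw [PySem.Dict.getD_modify]
      by_cases hxv : x = v
      · rw [if_pos hxv, PySem.Set.mem_add, PySem.Dict.getD_modify,
          if_neg (fun hh : v = u => huv hh.symm), hxv]
        have hvu : ¬ v = u := fun hh => huv hh.symm
        tauto
      · rw [if_neg hxv, PySem.Dict.getD_modify]
        by_cases hxu : x = u
        · rw [if_pos hxu, PySem.Set.mem_add, hxu]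
          tauto
        · rw [if_neg hxu]
          tauto
    have k : ∀ x, x ∈ ((d.modify u PySem.Set.empty (fun s => PySem.Set.add s v)).modify v
        PySem.Set.empty (fun s => PySem.Set.add s u)).keys ↔ x = v ∨ x = u ∨ x ∈ d.keys := by
      intro x
      rw [PySem.Dict.keys_modify, PySem.Dict.mem_keys_insert, PySem.Dict.keys_modify,
        PySem.Dict.mem_keys_insert]
    have nn : ∀ x, (((d.modify u PySem.Set.empty (fun s => PySem.Set.add s v)).modify v
        PySem.Set.empty (fun s => PySem.Set.add s u)).getD x PySem.Set.empty).Nodup := by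
      intro x
      rw [PySem.Dict.getD_modify]
      split
      · refine PySem.Set.nodup_add _ _ ?_
        rw [PySem.Dict.getD_modify]
        split
        · exact PySem.Set.nodup_add _ _ (h3 _)
        · exact h3 _
      · rw [PySem.Dict.getD_modify]
        split
        · exact PySem.Set.nodup_add _ _ (h3 _)
        · exact h3 _
    have nk : ((d.modify u PySem.Set.empty (fun s => PySem.Set.add s v)).modify v
        PySem.Set.empty (fun s => PySem.Set.add s u)).keys.Nodup := by
      rw [PySem.Dict.keys_modify]
      refine PySem.Dict.nodup_keys_insert _ _ _ ?_
      rw [PySem.Dict.keys_modify]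
      exact PySem.Dict.nodup_keys_insert _ _ _ h4
    refine ⟨?_, ?_, nn, nk⟩
    · intro x y
      rw [g, h1]
      constructor
      · rintro ((h | ⟨rfl, rfl⟩) | ⟨rfl, rfl⟩)
        · exact Or.inl h
        · exact Or.inr ⟨huv, Or.inl rfl⟩
        · exact Or.inr ⟨fun hh => huv hh.symm, Or.inr rfl⟩
      · rintro (h | ⟨hne, h | h⟩)
        · exact Or.inl (Or.inl h)
        · cases h; exact Or.inl (Or.inr ⟨rfl, rfl⟩)
        · cases h; exact Or.inr ⟨rfl, rfl⟩
    · intro x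
      rw [k, h2]
      constructor
      · rintro (rfl | rfl | ⟨y, hy⟩)
        · exact ⟨u, Or.inr ⟨fun hh => huv hh.symm, Or.inr rfl⟩⟩
        · exact ⟨v, Or.inr ⟨huv, Or.inl rfl⟩⟩
        · exact ⟨y, Or.inl hy⟩
      · rintro ⟨y, h | ⟨hne, h | h⟩⟩
        · exact Or.inr (Or.inr ⟨y, h⟩)
        · cases h; exact Or.inr (Or.inl rfl)
        · cases h; exact Or.inl rfl

theorem pvFoldB {l : List (Int × Int)} {d : PySem.Dict Int (PySem.Set Int)} {R : Int → Int → Prop}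
    (h : pvGoodB d R) :
    pvGoodB (l.foldl (fun d p =>
        if p.1 ≠ p.2 then
          (d.modify p.1 PySem.Set.empty (fun s => PySem.Set.add s p.2)).modify p.2 PySem.Set.empty
            (fun s => PySem.Set.add s p.1)
        else d) d)
      (fun x y => R x y ∨ (x ≠ y ∧ ((x, y) ∈ l ∨ (y, x) ∈ l))) := by
  induction l generalizing d R with
  | nil => simpa using pvGoodB_congr h (by simp)
  | cons p t ih =>
    simp only [List.foldl_cons]
    refine pvGoodB_congr (ih (pvStepB h p.1 p.2)) ?_
    intro x y
    constructor
    · rintro ((h | ⟨hne, h | h⟩) | ⟨hne, h | h⟩)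
      · exact Or.inl h
      · exact Or.inr ⟨hne, Or.inl (h ▸ List.mem_cons_self)⟩
      · exact Or.inr ⟨hne, Or.inr (h ▸ List.mem_cons_self)⟩
      · exact Or.inr ⟨hne, Or.inl (List.mem_cons_of_mem _ h)⟩
      · exact Or.inr ⟨hne, Or.inr (List.mem_cons_of_mem _ h)⟩
    · rintro (h | ⟨hne, h | h⟩)
      · exact Or.inl (Or.inl h)
      · rcases List.mem_cons.mp h with h | h
        · exact Or.inl (Or.inr ⟨hne, Or.inl h⟩)
        · exact Or.inr ⟨hne, Or.inl h⟩
      · rcases List.mem_cons.mp h with h | h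
        · exact Or.inl (Or.inr ⟨hne, Or.inr h⟩)
        · exact Or.inr ⟨hne, Or.inr h⟩

theorem pvGoodB_empty : pvGoodB PySem.Dict.empty (fun _ _ => False) := by
  refine ⟨?_, ?_, ?_, ?_⟩ <;> simp [PySem.Dict.getD_empty, PySem.Dict.keys_empty]

theorem pvGoodA_empty : pvGoodA PySem.Dict.empty (fun _ _ => False) := by
  refine ⟨?_, ?_, ?_, ?_⟩ <;> simp [PySem.Dict.getD_empty, PySem.Dict.keys_empty]

theorem pvGoodB_pbAdj (sf st : List Int) : pvGoodB (pbAdj sf st) (pvE (sf.zip st)) := by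
  refine pvGoodB_congr (pvFoldB pvGoodB_empty) ?_
  intro x y
  unfold pvE
  tauto

-- paIndex folds over indices; rewrite it as the fold over the zipped pairs
theorem paIndex_eq_zip (sf st : List Int) (h : sf.length = st.length) :
    paIndex sf st = (sf.zip st).foldl (fun d p => paStep d p.1 p.2) PySem.Dict.empty := by
  unfold paIndex
  have hz : (sf.zip st).length = sf.length := by
    rw [List.length_zip, h, min_self]
  have hbody : (PySem.List.pyRange 0 (sf.length : Int) 1).foldl
      (fun d i => paStep d (PySem.List.pyGetD sf i 0) (PySem.List.pyGetD st i 0)) PySem.Dict.empty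
      = (PySem.List.pyRange 0 ((sf.zip st).length : Int) 1).foldl
      (fun d i => paStep d (PySem.List.pyGetD (sf.zip st) i (0, 0)).1
        (PySem.List.pyGetD (sf.zip st) i (0, 0)).2) PySem.Dict.empty := by
    rw [hz]
    refine PySem.List.foldl_congr_mem _ _ _ _ ?_
    intro acc i hi
    rcases PySem.List.mem_pyRange_one.mp hi with ⟨h0, h1⟩
    have hilen : i < ((sf.zip st).length : Int) := by rw [hz]; exact_mod_cast h1
    have h1' : i < (sf.length : Int) := h1
    have h2' : i < (st.length : Int) := by omega
    rw [PySem.List.pyGetD_eq_getElem (h0 := h0) (h1 := hilen),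
      PySem.List.pyGetD_eq_getElem (h0 := h0) (h1 := h1'),
      PySem.List.pyGetD_eq_getElem (h0 := h0) (h1 := h2'), List.getElem_zip]
  rw [hbody]
  have := PySem.List.foldl_pyRange_pyGetD (sf.zip st) (0, 0)
    (fun d (p : Int × Int) => paStep d p.1 p.2) PySem.Dict.empty (a := 0) le_rfl
  simpa [PySem.List.len] using this

theorem pvGoodA_paIndex (sf st : List Int) (h : sf.length = st.length) :
    pvGoodA (paIndex sf st) (pvE (sf.zip st)) := by
  rw [paIndex_eq_zip sf st h]
  refine pvGoodA_congr (pvFoldA pvGoodA_empty) ?_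
  intro x y
  unfold pvE
  tauto

-- the value-sorting fold, pointwise
theorem pvSortFold (ks : List Int) (d : PySem.Dict Int (List Int)) (x : Int) :
    ((ks.foldl (fun d k => d.modify k [] (fun l => PySem.List.sorted l (fun y => y) false)) d).getD x [])
      = if x ∈ ks then PySem.List.sorted (d.getD x []) (fun y => y) false else d.getD x [] := by
  induction ks generalizing d with
  | nil => simp
  | cons k t ih =>
    simp only [List.foldl_cons]
    rw [ih]
    by_cases hxt : x ∈ t
    · rw [if_pos hxt, if_pos (List.mem_cons_of_mem _ hxt), PySem.Dict.getD_modify]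
      split
      · next hx => subst hx; rw [PySem.List.sorted_sorted]
      · rfl
    · rw [if_neg hxt, PySem.Dict.getD_modify]
      by_cases hxk : x = k
      · subst hxk; rw [if_pos rfl, if_pos List.mem_cons_self]
      · rw [if_neg hxk, if_neg (by simp [hxk, hxt])]

-- sorting the values keeps the invariant
theorem pvGoodA_paSorted {d : PySem.Dict Int (List Int)} {R : Int → Int → Prop}
    (h : pvGoodA d R) : pvGoodA (paSorted d) R := by
  obtain ⟨h1, h2, h3, h4⟩ := h
  unfold paSorted
  have hkeys : (d.keys.foldl (fun d k => d.modify k []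
      (fun l => PySem.List.sorted l (fun y => y) false)) d).keys = PySem.Set.update d.keys d.keys := by
    exact PySem.Dict.keys_foldl_modify d.keys [] (fun _ _ l => PySem.List.sorted l (fun y => y) false) d
  refine ⟨?_, ?_, ?_, ?_⟩
  · intro x y
    rw [pvSortFold]
    split
    · rw [PySem.List.mem_sorted]; exact h1 x y
    · exact h1 x y
  · intro x
    rw [hkeys, PySem.Set.mem_update, or_self]
    exact h2 x
  · intro x
    rw [pvSortFold]
    split
    · exact ((PySem.List.sorted_perm (d.getD x []) (fun y => y) false).nodup_iff).mpr (h3 x)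
    · exact h3 x
  · rw [hkeys]
    exact PySem.Set.nodup_update _ _ h4

-- membership in a fold that conditionally appends
theorem pvMemFoldAcc {α β : Type} (l : List α) (g : List β → α → List β) (Q : α → β → Prop)
    (hg : ∀ acc x y, x ∈ l → (y ∈ g acc x ↔ y ∈ acc ∨ Q x y)) :
    ∀ acc y, y ∈ l.foldl g acc ↔ y ∈ acc ∨ ∃ x ∈ l, Q x y := by
  induction l with
  | nil => simp
  | cons x t ih =>
    intro acc y
    simp only [List.foldl_cons]
    rw [ih (fun acc z y hz => hg acc z y (List.mem_cons_of_mem _ hz)) (g acc x) y,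
      hg acc x y List.mem_cons_self]
    simp only [List.mem_cons]
    constructor
    · rintro ((h | h) | ⟨z, hz, hq⟩)
      · exact Or.inl h
      · exact Or.inr ⟨x, Or.inl rfl, h⟩
      · exact Or.inr ⟨z, Or.inr hz, hq⟩
    · rintro (h | ⟨z, rfl | hz, hq⟩)
      · exact Or.inl (Or.inl h)
      · exact Or.inl (Or.inr hq)
      · exact Or.inr ⟨z, hz, hq⟩

def pvTri (R : Int → Int → Prop) (t : Int × Int × Int) : Prop :=
  R t.1 t.2.1 ∧ R t.2.1 t.2.2 ∧ R t.1 t.2.2 ∧ t.1 < t.2.1 ∧ t.2.1 < t.2.2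

theorem pvMemTrios {d : PySem.Dict Int (List Int)} {R : Int → Int → Prop}
    (h : pvGoodA d R) (hs : ∀ x y, R x y ↔ R y x) (t : Int × Int × Int) :
    t ∈ paTrios d ↔ pvTri R t := by
  obtain ⟨h1, h2, h3, h4⟩ := h
  unfold paTrios
  rw [pvMemFoldAcc _ _
    (fun a y => ∃ b ∈ d.getD a [], ∃ c ∈ d.getD b [],
      (a ∈ d.getD c [] ∧ (a < b ∧ b < c)) ∧ y = (a, b, c)) ?hg1 [] t]
  case hg1 =>
    intro acc a y _
    rw [pvMemFoldAcc _ _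
      (fun b y => ∃ c ∈ d.getD b [], (a ∈ d.getD c [] ∧ (a < b ∧ b < c)) ∧ y = (a, b, c)) ?hg2 acc y]
    case hg2 =>
      intro acc b y _
      rw [pvMemFoldAcc _ _
        (fun c y => (a ∈ d.getD c [] ∧ (a < b ∧ b < c)) ∧ y = (a, b, c)) ?hg3 acc y]
      case hg3 =>
        intro acc c y _
        split
        · next hc =>
          have hm : a ∈ d.getD c [] := List.contains_iff_mem.mp hc
          split
          · next hlt => simp [hm, hlt]
          · next hlt => simp [hm, hlt]
        · next hc =>
          have hm : a ∉ d.getD c [] := fun hh => hc (List.contains_iff_mem.mpr hh)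
          simp [hm]
  simp only [List.not_mem_nil, false_or, PySem.List.mem_sorted]
  constructor
  · rintro ⟨a, ha, b, hb, c, hc, ⟨hca, hab, hbc⟩, rfl⟩
    exact ⟨(h1 a b).mp hb, (h1 b c).mp hc, (hs c a).mp ((h1 c a).mp hca), hab, hbc⟩
  · rintro ⟨hab, hbc, hac, h12, h23⟩
    exact ⟨t.1, (h2 t.1).mpr ⟨t.2.1, hab⟩, t.2.1, (h1 _ _).mpr hab, t.2.2, (h1 _ _).mpr hbc,
      ⟨(h1 _ _).mpr ((hs t.1 t.2.2).mp hac), h12, h23⟩, rfl⟩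

-- membership and nodup through the dedup loop of A's count
theorem pvMemPaAdd (t : Int × Int × Int) (l : List Int) :
    ∀ acc y, y ∈ l.foldl (paAdd t) acc ↔
      y ∈ acc ∨ (y ∈ l ∧ ¬(y = t.1 ∨ y = t.2.1 ∨ y = t.2.2)) := by
  induction l with
  | nil => simp
  | cons x xs ih =>
    intro acc y
    simp only [List.foldl_cons]
    rw [ih]
    unfold paAdd
    constructor
    · rintro (h | ⟨hx, hnt⟩)
      · split at h
        · next hc =>
          rcases List.mem_append.mp h with h | h
          · exact Or.inl h
          · simp only [List.mem_singleton] at h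
            subst h
            exact Or.inr ⟨List.mem_cons_self, hc.2⟩
        · exact Or.inl h
      · exact Or.inr ⟨List.mem_cons_of_mem _ hx, hnt⟩
    · rintro (h | ⟨hx, hnt⟩)
      · left; split
        · exact List.mem_append_left _ h
        · exact h
      · rcases List.mem_cons.mp hx with rfl | hx
        · by_cases hy : y ∈ acc
          · left; split
            · exact List.mem_append_left _ hy
            · exact hy
          · left
            rw [if_pos ⟨hy, hnt⟩]
            exact List.mem_append_right _ (List.mem_singleton.mpr rfl)
        · exact Or.inr ⟨hx, hnt⟩

theorem pvNodupPaAdd (t : Int × Int × Int) (l : List Int) :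
    ∀ acc, acc.Nodup → (l.foldl (paAdd t) acc).Nodup := by
  induction l with
  | nil => exact fun acc h => h
  | cons x xs ih =>
    intro acc h
    simp only [List.foldl_cons]
    refine ih _ ?_
    unfold paAdd
    split
    · next hc =>
      exact h.append (List.nodup_singleton x)
        (by intro b hb hb'; simp only [List.mem_singleton] at hb'; subst hb'; exact hc.1 hb)
    · exact h

-- getD through B's dict-comprehension fold
theorem pvGetDFoldIns (l : List Int) (f : Int → PySem.Set Int) (d : PySem.Dict Int (PySem.Set Int))
    (x : Int) :
    (l.foldl (fun d u => d.insert u (f u)) d).getD x PySem.Set.empty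
      = if x ∈ l then f x else d.getD x PySem.Set.empty := by
  induction l generalizing d with
  | nil => simp
  | cons u t ih =>
    simp only [List.foldl_cons]
    rw [ih]
    by_cases hxt : x ∈ t
    · rw [if_pos hxt, if_pos (List.mem_cons_of_mem _ hxt)]
    · rw [if_neg hxt, PySem.Dict.getD_insert]
      by_cases hxu : x = u
      · subst hxu
        rw [if_pos rfl, if_pos (by simp)]
      · rw [if_neg hxu, if_neg (by simp [hxu, hxt])]

-- what B's oriented adjacency holds, given the invariant on adj
theorem pvFwdGetD {adj : PySem.Dict Int (PySem.Set Int)} {R : Int → Int → Prop}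
    (h : pvGoodB adj R) (u y : Int) :
    y ∈ (pbFwd adj).getD u PySem.Set.empty ↔ R u y ∧ u < y := by
  obtain ⟨h1, h2, _, _⟩ := h
  unfold pbFwd
  rw [pvGetDFoldIns]
  split
  · next hu =>
    simp only [List.mem_filter, decide_eq_true_eq]
    rw [h1]
  · next hu =>
    rw [PySem.Dict.getD_empty]
    constructor
    · intro hh
      exact absurd hh List.not_mem_nil
    · rintro ⟨hr, _⟩
      exact absurd ((h2 u).mpr ⟨y, hr⟩) hu

theorem pvFwdKeys {adj : PySem.Dict Int (PySem.Set Int)} {R : Int → Int → Prop}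
    (h : pvGoodB adj R) (u : Int) :
    u ∈ (pbFwd adj).keys ↔ ∃ y, R u y := by
  obtain ⟨_, h2, _, _⟩ := h
  unfold pbFwd
  rw [PySem.Dict.keys_foldl_insert, PySem.Set.mem_update]
  simp only [PySem.Dict.keys_empty, List.not_mem_nil, false_or]
  exact h2 u

-- what B's counts comprehension generates
theorem pvMemCountsB {adj : PySem.Dict Int (PySem.Set Int)} {R : Int → Int → Prop}
    (h : pvGoodB adj R) (x : Int) :
    x ∈ pbCounts adj (pbFwd adj) ↔ ∃ t, pvTri R t ∧ x = pbCount adj t.1 t.2.1 t.2.2 := by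
  unfold pbCounts
  simp only [List.mem_flatMap, List.mem_map, PySem.Set.mem_inter]
  constructor
  · rintro ⟨u, hu, v, hv, w, ⟨hwu, hwv⟩, rfl⟩
    rw [pvFwdGetD h] at hv hwu hwv
    exact ⟨(u, v, w), ⟨hv.1, hwv.1, hwu.1, hv.2, hwv.2⟩, rfl⟩
  · rintro ⟨⟨u, v, w⟩, ⟨huv, hvw, huw, h12, h23⟩, rfl⟩
    refine ⟨u, (pvFwdKeys h u).mpr ⟨v, huv⟩, v, ?_, w, ⟨?_, ?_⟩, rfl⟩
    · rw [pvFwdGetD h]; exact ⟨huv, h12⟩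
    · rw [pvFwdGetD h]; exact ⟨huw, lt_trans h12 h23⟩
    · rw [pvFwdGetD h]; exact ⟨hvw, h23⟩

-- a Nodup PySem.Set's Python length is its Finset cardinality
theorem pvLenEqCard (s : PySem.Set Int) (h : s.Nodup) :
    PySem.Set.len s = (s.toFinset.card : Int) := by
  unfold PySem.Set.len
  rw [List.toFinset_card_of_nodup h]

theorem pvInterToFinset (s t : PySem.Set Int) :
    (PySem.Set.inter s t).toFinset = s.toFinset ∩ t.toFinset := by
  ext y
  simp [List.mem_toFinset, PySem.Set.mem_inter, Finset.mem_inter]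

-- A's dedup-list count equals B's inclusion-exclusion count on any trio
theorem pvCountEq {dA : PySem.Dict Int (List Int)} {dB : PySem.Dict Int (PySem.Set Int)}
    {R : Int → Int → Prop} (hA : pvGoodA dA R) (hB : pvGoodB dB R)
    (hs : ∀ x y, R x y ↔ R y x) (t : Int × Int × Int) (ht : pvTri R t) :
    paCount dA t = pbCount dB t.1 t.2.1 t.2.2 := by
  obtain ⟨a1, a2, a3, a4⟩ := hA
  obtain ⟨b1, b2, b3, b4⟩ := hB
  obtain ⟨huv, hvw, huw, h12, h23⟩ := ht
  unfold paCount pbCount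
  set L := ((dA.getD t.2.2 []).foldl (paAdd t)
    ((dA.getD t.2.1 []).foldl (paAdd t) ((dA.getD t.1 []).foldl (paAdd t) []))) with hL
  set FA := (dB.getD t.1 PySem.Set.empty).toFinset with hFA
  set FB := (dB.getD t.2.1 PySem.Set.empty).toFinset with hFB
  set FC := (dB.getD t.2.2 PySem.Set.empty).toFinset with hFC
  -- L as a Finset
  have hLfin : L.toFinset = (FA ∪ FB ∪ FC) \ {t.1, t.2.1, t.2.2} := by
    ext y
    rw [List.mem_toFinset, hL, pvMemPaAdd, pvMemPaAdd, pvMemPaAdd]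
    simp only [List.not_mem_nil, false_or, Finset.mem_sdiff, Finset.mem_union,
      Finset.mem_insert, Finset.mem_singleton, hFA, hFB, hFC, List.mem_toFinset]
    rw [a1, a1, a1, b1, b1, b1]
    tauto
  have hndL : L.Nodup := pvNodupPaAdd _ _ _ (pvNodupPaAdd _ _ _ (pvNodupPaAdd _ _ _ List.nodup_nil))
  have hLlen : (L.length : Int) = (((FA ∪ FB ∪ FC) \ {t.1, t.2.1, t.2.2}).card : Int) := by
    rw [← hLfin, List.toFinset_card_of_nodup hndL]
  -- the three members lie in the union and are distinct
  have hsub : ({t.1, t.2.1, t.2.2} : Finset Int) ⊆ FA ∪ FB ∪ FC := by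
    intro y hy
    simp only [Finset.mem_insert, Finset.mem_singleton] at hy
    rcases hy with rfl | rfl | rfl
    · exact Finset.mem_union_left _ (Finset.mem_union_right _
        (by rw [hFB, List.mem_toFinset, b1]; exact (hs t.1 t.2.1).mp huv))
    · exact Finset.mem_union_left _ (Finset.mem_union_left _
        (by rw [hFA, List.mem_toFinset, b1]; exact huv))
    · exact Finset.mem_union_left _ (Finset.mem_union_left _
        (by rw [hFA, List.mem_toFinset, b1]; exact huw))
  have hcard3 : ({t.1, t.2.1, t.2.2} : Finset Int).card = 3 := by
    rw [Finset.card_insert_of_notMem (by simp; omega),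
      Finset.card_insert_of_notMem (by simp; omega), Finset.card_singleton]
  have hsd : ((FA ∪ FB ∪ FC) \ {t.1, t.2.1, t.2.2}).card = (FA ∪ FB ∪ FC).card - 3 := by
    rw [Finset.card_sdiff, Finset.inter_eq_left.mpr hsub, hcard3]
  have h3le : 3 ≤ (FA ∪ FB ∪ FC).card := hcard3 ▸ Finset.card_le_card hsub
  -- inclusion-exclusion pieces
  have n1 : (FA ∪ FB).card + (FA ∩ FB).card = FA.card + FB.card :=
    Finset.card_union_add_card_inter FA FB
  have e1 : (FA ∪ FB) ∩ FC = (FA ∩ FC) ∪ (FB ∩ FC) := Finset.union_inter_distrib_right FA FB FC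
  have e2 : (FA ∩ FC) ∩ (FB ∩ FC) = FA ∩ FB ∩ FC := by
    ext y; simp only [Finset.mem_inter]; tauto
  have n2 : (FA ∪ FB ∪ FC).card + ((FA ∩ FC) ∪ (FB ∩ FC)).card = (FA ∪ FB).card + FC.card := by
    rw [← e1]; exact Finset.card_union_add_card_inter (FA ∪ FB) FC
  have n3 : ((FA ∩ FC) ∪ (FB ∩ FC)).card + (FA ∩ FB ∩ FC).card
      = (FA ∩ FC).card + (FB ∩ FC).card := by
    rw [← e2]; exact Finset.card_union_add_card_inter (FA ∩ FC) (FB ∩ FC)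
  -- rewrite B's set lengths into Finset cards
  rw [pvLenEqCard _ (b3 _), pvLenEqCard _ (b3 _), pvLenEqCard _ (b3 _),
    pvLenEqCard _ (PySem.Set.nodup_inter _ _ (b3 _)),
    pvLenEqCard _ (PySem.Set.nodup_inter _ _ (b3 _)),
    pvLenEqCard _ (PySem.Set.nodup_inter _ _ (b3 _)),
    pvLenEqCard _ (PySem.Set.nodup_inter _ _ (PySem.Set.nodup_inter _ _ (b3 _))),
    pvInterToFinset, pvInterToFinset, pvInterToFinset, pvInterToFinset, pvInterToFinset,
    hLlen, hsd, ← hFA, ← hFB, ← hFC]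
  omega

theorem pvMinCongr (l1 l2 : List Int) (h : ∀ x, x ∈ l1 ↔ x ∈ l2) :
    PySem.List.min? l1 (fun x => x) = PySem.List.min? l2 (fun x => x) := by
  rcases h1 : PySem.List.min? l1 (fun x => x) with _ | m1
  · rw [PySem.List.min?_eq_none_iff] at h1
    subst h1
    rw [eq_comm, PySem.List.min?_eq_none_iff]
    cases l2 with
    | nil => rfl
    | cons a t => exact absurd ((h a).mpr List.mem_cons_self) (List.not_mem_nil)
  · rcases h2 : PySem.List.min? l2 (fun x => x) with _ | m2
    · rw [PySem.List.min?_eq_none_iff] at h2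
      subst h2
      have := PySem.List.min?_mem h1
      exact absurd ((h m1).mp this) (List.not_mem_nil)
    · have hm1 : m1 ∈ l2 := (h m1).mp (PySem.List.min?_mem h1)
      have hm2 : m2 ∈ l1 := (h m2).mpr (PySem.List.min?_mem h2)
      have le1 : m1 ≤ m2 := PySem.List.min?_isMin h1 m2 hm2
      have le2 : m2 ≤ m1 := PySem.List.min?_isMin h2 m1 hm1
      rw [le_antisymm le1 le2]

-- ===== VERDICT (by name: the statement is the Claim_ definition above) =====
theorem space_acquaintance_spec : Claim_equal_space_acquaintance := by
  intro sf st _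
  unfold Spec_space_acquaintance
  by_cases hlen : sf.length = st.length
  · have hA : pvGoodA (paSorted (paIndex sf st)) (pvE (sf.zip st)) :=
      pvGoodA_paSorted (pvGoodA_paIndex sf st hlen)
    have hB := pvGoodB_pbAdj sf st
    have hs : ∀ x y, pvE (sf.zip st) x y ↔ pvE (sf.zip st) y x := by
      intro x y; unfold pvE; tauto
    have hmm : ∀ x, x ∈ (paTrios (paSorted (paIndex sf st))).map (paCount (paSorted (paIndex sf st)))
        ↔ x ∈ pbCounts (pbAdj sf st) (pbFwd (pbAdj sf st)) := by
      intro x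
      rw [List.mem_map, pvMemCountsB hB]
      constructor
      · rintro ⟨t, ht, rfl⟩
        have htri := (pvMemTrios hA hs t).mp ht
        exact ⟨t, htri, pvCountEq hA hB hs t htri⟩
      · rintro ⟨t, ht, rfl⟩
        exact ⟨t, (pvMemTrios hA hs t).mpr ht, pvCountEq hA hB hs t ht⟩
    have hmin := pvMinCongr _ _ hmm
    unfold space_acquaintance space_acquaintance_alt
    rw [if_neg (not_not_intro hlen), if_neg (not_not_intro hlen)]
    show (if (paTrios (paSorted (paIndex sf st))).length = 0 then (-1 : Int)
        else (PySem.List.min? ((paTrios (paSorted (paIndex sf st))).foldl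
          (fun acc t => acc ++ [paCount (paSorted (paIndex sf st)) t]) []) (fun x => x)).getD (-1))
      = PySem.List.minD (pbCounts (pbAdj sf st) (pbFwd (pbAdj sf st))) (fun x => x) (-1)
    rw [PySem.List.foldl_append_singleton_eq_map, List.nil_append]
    unfold PySem.List.minD
    by_cases htr : (paTrios (paSorted (paIndex sf st))).length = 0
    · rw [if_pos htr]
      have he : paTrios (paSorted (paIndex sf st)) = [] := List.length_eq_zero_iff.mp htr
      have hnone : PySem.List.min? (pbCounts (pbAdj sf st) (pbFwd (pbAdj sf st))) (fun x => x) = none := by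
        rw [← hmin, he, List.map_nil, PySem.List.min?_eq_none_iff]
      rw [hnone]
      rfl
    · rw [if_neg htr, hmin]
  · unfold space_acquaintance space_acquaintance_alt
    rw [if_pos hlen, if_pos hlen]
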